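-- pv_equiv track=rewrite | github.com/darkovujica/algorithms-in-bioinformatics-python- | 3.poglavlje/BA3J_darko.py | unbalancedDegrees
-- ===== SOURCE A (Python) =====
-- def unbalancedDegrees(graph):
--     unbalancedNodesDict=dict()
--     for key in graph.keys():
--         inputDeg=0
--         for key2 in graph.keys():
--             if key2!=key:
--                 for node in graph[key2]:
--                     if node==key:
--                         inputDeg=inputDeg+1
--         if len(graph[key])!=inputDeg:
--             unbalancedNodesDict[key]=inputDeg-len(graph[key])
--     unbalancedNodes=[0,0]
--     for key in unbalancedNodesDict.keys():
--         if unbalancedNodesDict[key]>0: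
--             unbalancedNodes[0]=key
--         if unbalancedNodesDict[key]<0:
--             unbalancedNodes[1]=key
--     return unbalancedNodes
-- ===== SOURCE B (Python) =====
-- def unbalancedDegrees(graph):
--     # One pass over the adjacency lists counting in-degrees (edges from a
--     # node to itself are not counted, matching the original's key2 != key
--     # restriction), then one pass over the nodes comparing with out-degree.
--     indeg = {}
--     for key, targets in graph.items():
--         for node in targets:
--             if node != key:
--                 indeg[node] = indeg.get(node, 0) + 1
--     pos = 0
--     neg = 0
--     for key, targets in graph.items():
--         diff = indeg.get(key, 0) - len(targets)
--         if diff > 0: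
--             pos = key
--         elif diff < 0:
--             neg = key
--     return [pos, neg]
-- ===== Notes on version B (the rewrite author's own statement) =====
-- stated objective: faster
-- what changed: Replaces the per-node rescan of every adjacency list (computing each node's in-degree from scratch) with a single pass building an in-degree counter dict, then one linear scan comparing in- and out-degrees; Pre_ requires distinct keys, i.e. the list really models a Python dict.
import Mathlib
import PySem

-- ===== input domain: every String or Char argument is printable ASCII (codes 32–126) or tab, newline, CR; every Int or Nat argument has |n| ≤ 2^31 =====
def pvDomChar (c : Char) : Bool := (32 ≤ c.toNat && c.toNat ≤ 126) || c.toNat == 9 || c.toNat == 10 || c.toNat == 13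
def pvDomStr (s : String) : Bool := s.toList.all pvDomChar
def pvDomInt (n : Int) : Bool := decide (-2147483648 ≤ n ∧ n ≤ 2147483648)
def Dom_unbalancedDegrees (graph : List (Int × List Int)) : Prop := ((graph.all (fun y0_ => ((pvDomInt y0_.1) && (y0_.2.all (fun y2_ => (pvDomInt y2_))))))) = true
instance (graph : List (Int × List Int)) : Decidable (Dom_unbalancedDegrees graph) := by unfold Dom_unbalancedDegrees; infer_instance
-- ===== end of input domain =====

-- B replaces A's per-node rescan of all adjacency lists by a one-pass in-degree
-- counter dict followed by one linear scan (objective: faster, asymptotic).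

-- ===== PORT A =====
def unbalancedDegrees (graph : List (Int × List Int)) : List Int :=
  let g : PySem.Dict Int (List Int) := PySem.Dict.mk graph
  let unb : PySem.Dict Int Int :=
    g.keys.foldl (fun d key =>
      let inputDeg : Int :=
        g.keys.foldl (fun acc key2 =>
          if key2 ≠ key then
            (g.getD key2 []).foldl (fun c node => if node = key then c + 1 else c) acc
          else acc) 0
      if ((g.getD key []).length : Int) ≠ inputDeg then
        d.insert key (inputDeg - ((g.getD key []).length : Int))
      else d) PySem.Dict.empty
  let res : Int × Int :=
    unb.keys.foldl (fun r key =>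
      let r' := if unb.getD key 0 > 0 then (key, r.2) else r
      if unb.getD key 0 < 0 then (r'.1, key) else r') (0, 0)
  [res.1, res.2]

-- ===== PORT B =====
def unbalancedDegrees_alt (graph : List (Int × List Int)) : List Int :=
  let indeg : PySem.Dict Int Int :=
    graph.foldl (fun d kv =>
      kv.2.foldl (fun d node =>
        if node ≠ kv.1 then d.insert node (d.getD node 0 + 1) else d) d)
      PySem.Dict.empty
  let pn : Int × Int :=
    graph.foldl (fun pn kv =>
      let diff := indeg.getD kv.1 0 - (kv.2.length : Int)
      if diff > 0 then (kv.1, pn.2)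
      else if diff < 0 then (pn.1, kv.1)
      else pn) (0, 0)
  [pn.1, pn.2]

-- ===== PRECONDITION & SPEC =====
-- Pre_: the association list models a Python dict, so its keys are distinct
-- (every input the Python A accepts has this shape; nothing A returns on is excluded).
def Pre_unbalancedDegrees (graph : List (Int × List Int)) : Prop :=
  (graph.map Prod.fst).Nodup
instance (graph : List (Int × List Int)) : Decidable (Pre_unbalancedDegrees graph) := by
  unfold Pre_unbalancedDegrees; infer_instance

def pvWitness_unbalancedDegrees : (List (Int × List Int)) :=
  [(1, [2, 3]), (2, [3]), (3, [])]

def Spec_unbalancedDegrees (graph : List (Int × List Int)) (out : List Int) : Prop := out = unbalancedDegrees_alt graph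
instance (graph : List (Int × List Int)) (out : List Int) : Decidable (Spec_unbalancedDegrees graph out) := by unfold Spec_unbalancedDegrees; infer_instance

-- ===== CLAIM (what is proved, stated in full; the proofs are below) =====
def Claim_equal_unbalancedDegrees : Prop := ∀ (graph : List (Int × List Int)), Dom_unbalancedDegrees graph → Pre_unbalancedDegrees graph → Spec_unbalancedDegrees graph (unbalancedDegrees graph)

-- ===== LEMMAS AND PROOFS =====

def pvTerm (kv : Int × List Int) (key : Int) : Int :=
  ((kv.2.filter (fun n => decide (n ≠ kv.1))).count key : Int)

def pvInDeg (graph : List (Int × List Int)) (key : Int) : Int :=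
  (graph.map (fun kv => pvTerm kv key)).sum

def pvStep2 (r : Int × Int) (key v : Int) : Int × Int :=
  if v > 0 then (key, r.2) else if v < 0 then (r.1, key) else r

def pvCanon (graph : List (Int × List Int)) : List Int :=
  let p := graph.foldl (fun r kv => pvStep2 r kv.1 (pvInDeg graph kv.1 - (kv.2.length : Int))) (0, 0)
  [p.1, p.2]

theorem pv_countP (l : List Int) (a : Int) : l.countP (fun x => decide (x = a)) = l.count a := by
  rw [List.count_eq_countP]; apply List.countP_congr; intro x _; simp

theorem pvTerm_eq (kv : Int × List Int) (key : Int) :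
    pvTerm kv key = if kv.1 = key then 0 else (kv.2.count key : Int) := by
  unfold pvTerm
  by_cases h : kv.1 = key
  · simp [h, List.count_eq_zero]
  · rw [if_neg h, List.count_filter (by simpa using Ne.symm h)]

theorem pv_indeg_getD (graph : List (Int × List Int)) (d : PySem.Dict Int Int) (v : Int) :
    (graph.foldl (fun d kv =>
      kv.2.foldl (fun d node =>
        if node ≠ kv.1 then d.insert node (d.getD node 0 + 1) else d) d) d).getD v 0
    = d.getD v 0 + pvInDeg graph v := by
  induction graph generalizing d with
  | nil => simp [pvInDeg]
  | cons kv t ih =>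
    rw [List.foldl_cons, ih]
    rw [PySem.List.foldl_ite_eq_foldl_filter (p := fun node => node ≠ kv.1)
      (f := fun (d : PySem.Dict Int Int) (node : Int) => d.insert node (d.getD node 0 + 1))]
    rw [PySem.Dict.getD_foldl_insert_add_one]
    simp [pvInDeg, pvTerm]; ring

theorem pv_alt_eq_canon (graph : List (Int × List Int)) :
    unbalancedDegrees_alt graph = pvCanon graph := by
  simp only [unbalancedDegrees_alt, pvCanon, pv_indeg_getD, PySem.Dict.getD_empty, zero_add,
    pvStep2]

theorem pv_a_inner (graph : List (Int × List Int)) (hpre : (graph.map Prod.fst).Nodup)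
    (key : Int) :
    ((PySem.Dict.mk graph).keys).foldl (fun acc key2 =>
      if key2 ≠ key then
        ((PySem.Dict.mk graph).getD key2 []).foldl (fun c node => if node = key then c + 1 else c) acc
      else acc) 0 = pvInDeg graph key := by
  have hkeys : (PySem.Dict.mk graph).keys = graph.map Prod.fst := rfl
  rw [hkeys, List.foldl_map]
  have h1 : graph.foldl (fun acc kv2 =>
      if kv2.1 ≠ key then
        ((PySem.Dict.mk graph).getD kv2.1 []).foldl (fun c node => if node = key then c + 1 else c) acc
      else acc) 0
      = graph.foldl (fun acc kv2 => acc + pvTerm kv2 key) 0 := by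
    apply PySem.List.foldl_congr_mem
    intro acc kv2 hmem
    by_cases h : kv2.1 = key
    · simp [h, pvTerm_eq]
    · rw [if_pos h, PySem.Dict.getD_of_mem_items (d := PySem.Dict.mk graph) (k := kv2.1) (v := kv2.2) (by simpa using hmem) hpre,
        PySem.List.foldl_ite_add_one (p := fun node => node = key), pv_countP, pvTerm_eq, if_neg h]
  rw [h1, PySem.List.foldl_add]
  simp [pvInDeg]

theorem pv_stepA' (r : Int × Int) (key v : Int) :
    (if v < 0 then ((if v > 0 then (key, r.2) else r).1, key)
     else if v > 0 then (key, r.2) else r) = pvStep2 r key v := by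
  by_cases h1 : v > 0 <;> by_cases h2 : v < 0 <;> simp [h1, h2, pvStep2] <;> omega

theorem pvStep2_zero (r : Int × Int) (key : Int) : pvStep2 r key 0 = r := by
  simp [pvStep2]

theorem pv_a_eq_canon (graph : List (Int × List Int)) (hpre : (graph.map Prod.fst).Nodup) :
    unbalancedDegrees graph = pvCanon graph := by
  have hkeys : (PySem.Dict.mk graph).keys = graph.map Prod.fst := rfl
  simp only [unbalancedDegrees, pv_a_inner graph hpre]
  set u : PySem.Dict Int Int := List.foldl
    (fun d key => if (((PySem.Dict.mk graph).getD key []).length : Int) ≠ pvInDeg graph key then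
        d.insert key (pvInDeg graph key - (((PySem.Dict.mk graph).getD key []).length : Int)) else d)
    PySem.Dict.empty (PySem.Dict.mk graph).keys with hu
  have hval : ∀ kv ∈ graph, (PySem.Dict.mk graph).getD kv.1 [] = kv.2 := by
    intro kv hmem
    exact PySem.Dict.getD_of_mem_items (d := PySem.Dict.mk graph) (k := kv.1) (v := kv.2)
      (by simpa using hmem) hpre []
  have hui : u.items = ((graph.map Prod.fst).filter
      (fun key => decide ((((PySem.Dict.mk graph).getD key []).length : Int) ≠ pvInDeg graph key))).map
        (fun a => (a, pvInDeg graph a - (((PySem.Dict.mk graph).getD a []).length : Int))) := by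
    rw [hu, ← hkeys]
    rw [PySem.List.foldl_ite_eq_foldl_filter
      (p := fun key => (((PySem.Dict.mk graph).getD key []).length : Int) ≠ pvInDeg graph key)
      (f := fun (d : PySem.Dict Int Int) (key : Int) =>
        d.insert key (pvInDeg graph key - (((PySem.Dict.mk graph).getD key []).length : Int)))]
    have h := PySem.Dict.items_foldl_insert_fresh
      (l := ((PySem.Dict.mk graph).keys).filter
        (fun x => decide ((((PySem.Dict.mk graph).getD x []).length : Int) ≠ pvInDeg graph x)))
      (k := fun a => a)
      (v := fun a => pvInDeg graph a - (((PySem.Dict.mk graph).getD a []).length : Int))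
      (d := PySem.Dict.empty)
      (by intro a _; simp) (by simpa [hkeys] using hpre.filter _)
    simpa using h
  have hukeys : u.keys = (graph.map Prod.fst).filter
      (fun key => decide ((((PySem.Dict.mk graph).getD key []).length : Int) ≠ pvInDeg graph key)) := by
    show u.items.map Prod.fst = _
    rw [hui, List.map_map,
      show (Prod.fst ∘ fun a => (a, pvInDeg graph a - (((PySem.Dict.mk graph).getD a []).length : Int))) = id
        from funext fun _ => rfl, List.map_id]
  have hund : u.keys.Nodup := by
    rw [hukeys]; exact hpre.filter _
  have hugetD : ∀ key ∈ (graph.map Prod.fst).filter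
      (fun key => decide ((((PySem.Dict.mk graph).getD key []).length : Int) ≠ pvInDeg graph key)),
      u.getD key 0 = pvInDeg graph key - (((PySem.Dict.mk graph).getD key []).length : Int) := by
    intro key hk
    refine PySem.Dict.getD_of_mem_items (d := u) (k := key) ?_ hund 0
    rw [hui]
    exact List.mem_map_of_mem hk
  rw [hukeys]
  set Kf := (graph.map Prod.fst).filter
    (fun key => decide ((((PySem.Dict.mk graph).getD key []).length : Int) ≠ pvInDeg graph key)) with hKf
  set G := fun (r : Int × Int) (key : Int) =>
    pvStep2 r key (pvInDeg graph key - (((PySem.Dict.mk graph).getD key []).length : Int)) with hG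
  have h5 : List.foldl (fun r key =>
      if u.getD key 0 < 0 then ((if u.getD key 0 > 0 then (key, r.2) else r).1, key)
      else if u.getD key 0 > 0 then (key, r.2) else r) ((0 : Int), (0 : Int)) Kf
      = List.foldl G ((0 : Int), (0 : Int)) Kf := by
    apply PySem.List.foldl_congr_mem
    intro r key hk
    rw [hugetD key hk, pv_stepA', hG]
  have h6 : List.foldl G ((0 : Int), (0 : Int)) Kf
      = List.foldl G ((0 : Int), (0 : Int)) (graph.map Prod.fst) := by
    rw [hKf, ← PySem.List.foldl_ite_eq_foldl_filter
      (p := fun key => (((PySem.Dict.mk graph).getD key []).length : Int) ≠ pvInDeg graph key)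
      (f := G)]
    apply PySem.List.foldl_congr_mem
    intro r key _
    by_cases h : (((PySem.Dict.mk graph).getD key []).length : Int) ≠ pvInDeg graph key
    · rw [if_pos h]
    · rw [if_neg h]
      have hv : pvInDeg graph key - (((PySem.Dict.mk graph).getD key []).length : Int) = 0 := by
        omega
      rw [hG]
      show r = pvStep2 r key _
      rw [hv, pvStep2_zero]
  have h7 : List.foldl G ((0 : Int), (0 : Int)) (graph.map Prod.fst)
      = graph.foldl (fun r kv => pvStep2 r kv.1 (pvInDeg graph kv.1 - (kv.2.length : Int)))
        ((0 : Int), (0 : Int)) := by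
    rw [List.foldl_map]
    apply PySem.List.foldl_congr_mem
    intro r kv hm
    rw [hG]
    show pvStep2 r kv.1 _ = _
    rw [hval kv hm]
  rw [h5, h6, h7]
  rfl

-- ===== VERDICT (by name: the statement is the Claim_ definition above) =====
theorem unbalancedDegrees_spec : Claim_equal_unbalancedDegrees := by
  intro graph _ hpre
  unfold Spec_unbalancedDegrees
  rw [pv_a_eq_canon graph hpre, pv_alt_eq_canon]
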